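-- pv_equiv track=rewrite | github.com/leejoon2067/SW_Capstone_Design | AE_baseline/networks/unet.py | get_groups
-- ===== SOURCE A (Python) =====
-- from math import sqrt
--
-- def get_groups(channels: int) -> int:
--     """
--     Calculate suitable number of groups for GroupNormalization
--
--     Args:
--         channels: Number of channels
--
--     Returns:
--         Optimal number of groups (median divisor)
--     """
--     divisors = []
--     for i in range(1, int(sqrt(channels)) + 1):
--         if channels % i == 0:
--             divisors.append(i)
--             other = channels // i
--             if i != other:
--                 divisors.append(other)
--     return sorted(divisors)[len(divisors) // 2]
-- ===== SOURCE B (Python) =====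
-- from math import sqrt
--
-- def get_groups(channels: int) -> int:
--     """
--     Calculate suitable number of groups for GroupNormalization
--
--     Args:
--         channels: Number of channels
--
--     Returns:
--         Optimal number of groups (median divisor)
--
--     Because divisors pair up symmetrically around sqrt(channels), the median
--     divisor is determined by the single largest divisor k <= sqrt(channels):
--     it is k itself when channels is a perfect square (odd divisor count),
--     and the cofactor channels // k otherwise.  So no divisor list, no sort
--     and no median indexing are needed.
--     """
--     k = int(sqrt(channels))
--     while channels % k != 0:
--         k -= 1
--     return k if k * k == channels else channels // k
-- ===== Notes on version B (the rewrite author's own statement) =====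
-- stated objective: alternative
-- what changed: B builds no divisor list at all: since divisors pair symmetrically around sqrt(channels), the median divisor is determined by the single largest divisor k <= sqrt(channels) (k itself for a perfect square, channels//k otherwise), so B scans downward from int(sqrt(channels)) to the first divisor and returns a closed-form answer, with no pair harvesting, no list and no sort.
import Mathlib
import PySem

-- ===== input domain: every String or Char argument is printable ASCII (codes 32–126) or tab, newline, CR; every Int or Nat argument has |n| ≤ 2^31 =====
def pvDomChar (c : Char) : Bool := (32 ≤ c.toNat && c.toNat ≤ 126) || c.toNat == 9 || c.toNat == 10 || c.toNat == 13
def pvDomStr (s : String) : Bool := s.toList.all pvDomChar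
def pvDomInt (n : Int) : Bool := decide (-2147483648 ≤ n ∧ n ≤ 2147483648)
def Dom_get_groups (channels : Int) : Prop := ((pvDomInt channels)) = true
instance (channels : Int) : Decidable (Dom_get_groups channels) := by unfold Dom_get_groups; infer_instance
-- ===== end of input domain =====

-- B builds no divisor list and does no sort: the median divisor is read off in closed
-- form from the single largest divisor ≤ √channels (an alternative of the same cost).

-- ===== PORT A =====
-- int(sqrt(channels)): math.sqrt is correctly rounded, so for 0 ≤ channels ≤ 2^31 (the domain)
-- int(sqrt(channels)) = ⌊√channels⌋ exactly; ported as Nat.sqrt channels.toNat.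
def pySqrtInt (n : Int) : Int := (Nat.sqrt n.toNat : Int)

def get_groups (channels : Int) : Int :=
  let divisors := (PySem.List.pyRange 1 (pySqrtInt channels + 1) 1).foldl
      (fun acc i =>
        if PySem.Int.mod channels i = 0 then
          let other := PySem.Int.floordiv channels i
          if i ≠ other then (acc ++ [i]) ++ [other] else acc ++ [i]
        else acc) []
  let srt := PySem.List.sorted divisors (fun x => x) false
  (PySem.List.pyGet? srt ((divisors.length / 2 : Nat) : Int)).getD 0

-- ===== PORT B =====
-- the `while channels % k != 0: k -= 1` loop of Source B, counting k down from int(sqrt(channels));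
-- at k = 0 Python would raise ZeroDivisionError (only reachable for channels ≤ 0, outside Pre_)
def findK (n : Int) : Nat → Int
  | 0 => 0
  | (k+1) => if PySem.Int.mod n ((k : Int) + 1) ≠ 0 then findK n k else ((k : Int) + 1)

def get_groups_alt (channels : Int) : Int :=
  let k := findK channels (pySqrtInt channels).toNat
  if k * k = channels then k else PySem.Int.floordiv channels k

-- ===== PRECONDITION & SPEC =====
-- Pre_ excludes non-positive channels, where Python A raises (ValueError from sqrt on a
-- negative, IndexError on the empty divisor list at 0); B raises there too
-- (ValueError from sqrt, or ZeroDivisionError at k = 0).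
def Pre_get_groups (channels : Int) : Prop := 1 ≤ channels
instance (channels : Int) : Decidable (Pre_get_groups channels) := by unfold Pre_get_groups; infer_instance
def pvWitness_get_groups : Int := 64

def Spec_get_groups (channels : Int) (out : Int) : Prop := out = get_groups_alt channels
instance (channels : Int) (out : Int) : Decidable (Spec_get_groups channels out) := by unfold Spec_get_groups; infer_instance

-- ===== CLAIM (what is proved, stated in full; the proofs are below) =====
def Claim_equal_get_groups : Prop := ∀ (channels : Int), Dom_get_groups channels → Pre_get_groups channels → Spec_get_groups channels (get_groups channels)

-- ===== LEMMAS AND PROOFS =====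

-- the small divisors (≤ √n) and their cofactors, as filters of the sqrt-bounded range
def divsF (n : Int) : List Int :=
  (PySem.List.pyRange 1 (pySqrtInt n + 1) 1).filter (fun j => decide (PySem.Int.mod n j = 0))
def divsG (n : Int) : List Int :=
  ((PySem.List.pyRange 1 (pySqrtInt n + 1) 1).filter
      (fun j => decide (PySem.Int.mod n j = 0) && decide (j * j ≠ n))).map
    (fun j => PySem.Int.floordiv n j)

lemma sqrt_facts (n : Int) (hn : 1 ≤ n) :
    pySqrtInt n * pySqrtInt n ≤ n ∧ n < (pySqrtInt n + 1) * (pySqrtInt n + 1) ∧ 1 ≤ pySqrtInt n := by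
  have h0 : ((n.toNat : Int)) = n := Int.toNat_of_nonneg (by omega)
  have h1 := Nat.sqrt_le n.toNat
  have h2 := Nat.lt_succ_sqrt n.toNat
  have h3 : 1 ≤ Nat.sqrt n.toNat := by
    have := Nat.sqrt_pos.mpr (show 0 < n.toNat by omega)
    omega
  unfold pySqrtInt
  refine ⟨?_, ?_, by exact_mod_cast h3⟩
  · calc ((Nat.sqrt n.toNat : Int)) * (Nat.sqrt n.toNat : Int)
        = ((Nat.sqrt n.toNat * Nat.sqrt n.toNat : Nat) : Int) := by push_cast; ring
      _ ≤ (n.toNat : Int) := by exact_mod_cast h1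
      _ = n := h0
  · calc n = (n.toNat : Int) := h0.symm
      _ < (((Nat.sqrt n.toNat).succ : Nat) : Int) * (((Nat.sqrt n.toNat).succ : Nat) : Int) := by
            exact_mod_cast h2
      _ = ((Nat.sqrt n.toNat : Int) + 1) * ((Nat.sqrt n.toNat : Int) + 1) := by push_cast; ring

lemma div_mul_fact (n i : Int) (hn : 1 ≤ n) (hi : 1 ≤ i) (hm : PySem.Int.mod n i = 0) :
    i * PySem.Int.floordiv n i = n ∧ 1 ≤ PySem.Int.floordiv n i := by
  have hdvd : i ∣ n := (PySem.Int.mod_eq_zero_iff_dvd n i).mp hm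
  have he : PySem.Int.floordiv n i = n / i := PySem.Int.floordiv_eq_ediv_of_pos (by omega)
  have hmul : i * (n / i) = n := Int.mul_ediv_cancel' hdvd
  have hin : i ≤ n := Int.le_of_dvd (by omega) hdvd
  have h1 : 1 ≤ n / i := (Int.le_ediv_iff_mul_le (by omega)).mpr (by omega)
  exact ⟨by rw [he]; exact hmul, by rw [he]; exact h1⟩

-- the per-step chunk appended by A's loop body
def aChunk (n i : Int) : List Int :=
  if PySem.Int.mod n i = 0 then
    (if i ≠ PySem.Int.floordiv n i then [i, PySem.Int.floordiv n i] else [i])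
  else []

lemma aDivs_eq (n : Int) :
    (PySem.List.pyRange 1 (pySqrtInt n + 1) 1).foldl
      (fun acc i =>
        if PySem.Int.mod n i = 0 then
          let other := PySem.Int.floordiv n i
          if i ≠ other then (acc ++ [i]) ++ [other] else acc ++ [i]
        else acc) []
    = (PySem.List.pyRange 1 (pySqrtInt n + 1) 1).flatMap (aChunk n) := by
  have hb : (fun (acc : List Int) i =>
        if PySem.Int.mod n i = 0 then
          let other := PySem.Int.floordiv n i
          if i ≠ other then (acc ++ [i]) ++ [other] else acc ++ [i]
        else acc) = fun acc i => acc ++ aChunk n i := by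
    funext acc i
    simp only [aChunk]
    split_ifs <;> simp
  rw [hb, PySem.List.foldl_append_eq_flatMap]
  simp

lemma flatMap_append_perm {α β : Type} (l : List α) (f g : α → List β) :
    (l.flatMap fun x => f x ++ g x).Perm (l.flatMap f ++ l.flatMap g) := by
  induction l with
  | nil => simp
  | cons a l ih =>
    simp only [List.flatMap_cons]
    have h1 : ((f a ++ g a) ++ l.flatMap fun x => f x ++ g x).Perm
        ((f a ++ g a) ++ (l.flatMap f ++ l.flatMap g)) := ih.append_left _
    have h2 : (g a ++ (l.flatMap f ++ l.flatMap g)).Perm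
        (l.flatMap f ++ (g a ++ l.flatMap g)) := by
      have := (List.perm_append_comm (l₁ := g a) (l₂ := l.flatMap f)).append_right (l.flatMap g)
      simpa [List.append_assoc] using this
    have h3 := h2.append_left (f a)
    have h4 := h1.trans (by simpa [List.append_assoc] using h3)
    simpa [List.append_assoc] using h4

lemma filter_eq_flatMap {α : Type} (l : List α) (p : α → Bool) :
    l.filter p = l.flatMap fun a => if p a then [a] else [] := by
  induction l with
  | nil => rfl
  | cons a l ih => by_cases h : p a <;> simp [h, ih]

lemma filter_map_eq_flatMap {α β : Type} (l : List α) (p : α → Bool) (f : α → β) :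
    (l.filter p).map f = l.flatMap fun a => if p a then [f a] else [] := by
  induction l with
  | nil => rfl
  | cons a l ih => by_cases h : p a <;> simp [h, ih]

lemma chunk_eq (n i : Int) (hn : 1 ≤ n) (hi : 1 ≤ i) :
    aChunk n i = (if decide (PySem.Int.mod n i = 0) then [i] else []) ++
      (if decide (PySem.Int.mod n i = 0) && decide (i * i ≠ n)
        then [PySem.Int.floordiv n i] else []) := by
  unfold aChunk
  by_cases hm : PySem.Int.mod n i = 0
  · obtain ⟨hmul, hd1⟩ := div_mul_fact n i hn hi hm
    have hiff : i ≠ PySem.Int.floordiv n i ↔ i * i ≠ n := by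
      constructor
      · intro h hsq; exact h (by nlinarith)
      · intro h he
        exact h (by rw [← he] at hmul; exact hmul)
    by_cases hs : i * i ≠ n
    · simp [hm, hs, hiff.mpr hs]
    · push_neg at hs
      have hfd : PySem.Int.floordiv n i = i :=
        mul_left_cancel₀ (show (i:Int) ≠ 0 by omega) (by rw [hmul, hs])
      simp [hm, hs, hfd]
  · simp [hm]

lemma aDivs_perm (n : Int) (hn : 1 ≤ n) :
    ((PySem.List.pyRange 1 (pySqrtInt n + 1) 1).flatMap (aChunk n)).Perm
      (divsF n ++ divsG n) := by
  have hcg : (PySem.List.pyRange 1 (pySqrtInt n + 1) 1).flatMap (aChunk n)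
      = (PySem.List.pyRange 1 (pySqrtInt n + 1) 1).flatMap
        (fun i => (if decide (PySem.Int.mod n i = 0) then [i] else []) ++
          (if decide (PySem.Int.mod n i = 0) && decide (i * i ≠ n)
            then [PySem.Int.floordiv n i] else [])) := by
    refine List.flatMap_congr ?_
    intro i hi
    have := (PySem.List.mem_pyRange_one.mp hi).1
    exact chunk_eq n i hn this
  rw [hcg]
  have hperm := flatMap_append_perm (PySem.List.pyRange 1 (pySqrtInt n + 1) 1)
    (fun i => if decide (PySem.Int.mod n i = 0) then [i] else [])
    (fun i => if decide (PySem.Int.mod n i = 0) && decide (i * i ≠ n)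
      then [PySem.Int.floordiv n i] else [])
  have hF : divsF n = (PySem.List.pyRange 1 (pySqrtInt n + 1) 1).flatMap
      (fun i => if decide (PySem.Int.mod n i = 0) then [i] else []) := by
    unfold divsF; rw [filter_eq_flatMap]
  have hG : divsG n = (PySem.List.pyRange 1 (pySqrtInt n + 1) 1).flatMap
      (fun i => if decide (PySem.Int.mod n i = 0) && decide (i * i ≠ n)
        then [PySem.Int.floordiv n i] else []) := by
    unfold divsG; rw [filter_map_eq_flatMap]
  rw [hF, hG]
  exact hperm

lemma divsF_pairwise (n : Int) : (divsF n).Pairwise (· < ·) :=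
  List.Pairwise.filter _ (PySem.List.pairwise_lt_pyRange_one 1 (pySqrtInt n + 1))

lemma divsG_pairwise (n : Int) (hn : 1 ≤ n) : (divsG n).Pairwise (· > ·) := by
  unfold divsG
  refine List.pairwise_map.mpr ?_
  refine List.Pairwise.imp_of_mem ?_
    (List.Pairwise.filter _ (PySem.List.pairwise_lt_pyRange_one 1 (pySqrtInt n + 1)))
  intro a b ha hb hab
  have ha' := List.mem_filter.mp ha
  have hb' := List.mem_filter.mp hb
  have ha1 : 1 ≤ a := (PySem.List.mem_pyRange_one.mp ha'.1).1
  have hb1 : 1 ≤ b := (PySem.List.mem_pyRange_one.mp hb'.1).1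
  have hma : PySem.Int.mod n a = 0 := by simpa using (Bool.and_elim_left ha'.2)
  have hmb : PySem.Int.mod n b = 0 := by simpa using (Bool.and_elim_left hb'.2)
  obtain ⟨hA, hA1⟩ := div_mul_fact n a hn ha1 hma
  obtain ⟨hB, hB1⟩ := div_mul_fact n b hn hb1 hmb
  show PySem.Int.floordiv n b < PySem.Int.floordiv n a
  nlinarith [mul_lt_mul_of_pos_right hab hA1]

lemma mem_divsF (n x : Int) :
    x ∈ divsF n ↔ 1 ≤ x ∧ x ≤ pySqrtInt n ∧ PySem.Int.mod n x = 0 := by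
  unfold divsF
  rw [List.mem_filter, PySem.List.mem_pyRange_one]
  simp only [decide_eq_true_eq]
  omega

lemma divsF_le (n x : Int) (hx : x ∈ divsF n) : x ≤ pySqrtInt n :=
  ((mem_divsF n x).mp hx).2.1

lemma divsG_gt (n y : Int) (hn : 1 ≤ n) (hy : y ∈ divsG n) : pySqrtInt n < y := by
  obtain ⟨hS1, hS2, hS3⟩ := sqrt_facts n hn
  unfold divsG at hy
  obtain ⟨j, hj, rfl⟩ := List.mem_map.mp hy
  have hj' := List.mem_filter.mp hj
  have hjr := PySem.List.mem_pyRange_one.mp hj'.1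
  have hj1 : 1 ≤ j := hjr.1
  have hjS : j ≤ pySqrtInt n := by omega
  have hcond := hj'.2
  have hmj : PySem.Int.mod n j = 0 := by simpa using (Bool.and_elim_left hcond)
  have hsq : j * j ≠ n := by simpa using (Bool.and_elim_right hcond)
  obtain ⟨hmul, hd1⟩ := div_mul_fact n j hn hj1 hmj
  set d := PySem.Int.floordiv n j with hd
  by_contra hc
  push_neg at hc
  have hn2 : n = pySqrtInt n * pySqrtInt n := le_antisymm (by nlinarith) hS1
  have hjeq : j = pySqrtInt n := by nlinarith
  have hdeq : d = pySqrtInt n := by nlinarith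
  exact hsq (by rw [hjeq]; exact hn2.symm)

-- A's sorted divisor list is the small divisors followed by the reversed cofactors
lemma main_list_eq (n : Int) (hn : 1 ≤ n) :
    PySem.List.sorted ((PySem.List.pyRange 1 (pySqrtInt n + 1) 1).flatMap (aChunk n))
        (fun x => x) false
      = divsF n ++ (divsG n).reverse := by
  apply PySem.List.sorted_eq_of_perm_of_pairwise_lt
  · have h1 : ((divsG n).reverse).Perm (divsG n) := List.reverse_perm _
    exact (h1.append_left _).trans (aDivs_perm n hn).symm
  · rw [List.pairwise_append]
    refine ⟨divsF_pairwise n, ?_, ?_⟩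
    · rw [List.pairwise_reverse]
      exact divsG_pairwise n hn
    · intro x hx y hy
      have h1 := divsF_le n x hx
      have h2 := divsG_gt n y hn (List.mem_reverse.mp hy)
      omega

-- findK n m is the largest divisor of n in [1, m]
lemma findK_spec (n : Int) (hn : 1 ≤ n) : ∀ (m : Nat), 1 ≤ m →
    PySem.Int.mod n (findK n m) = 0 ∧ 1 ≤ findK n m ∧ findK n m ≤ (m : Int) ∧
      ∀ d : Int, 1 ≤ d → d ≤ (m : Int) → PySem.Int.mod n d = 0 → d ≤ findK n m := by
  intro m
  induction m with
  | zero => omega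
  | succ k ih =>
    intro _
    by_cases hm : PySem.Int.mod n ((k : Int) + 1) = 0
    · rw [findK, if_neg (by simpa using hm)]
      exact ⟨hm, by omega, by push_cast; omega, fun d _ hd _ => by push_cast at hd ⊢; omega⟩
    · have hk1 : 1 ≤ k := by
        by_contra hc
        have hk0 : k = 0 := by omega
        apply hm
        rw [hk0]
        exact (PySem.Int.mod_eq_zero_iff_dvd n 1).mpr (one_dvd n)
      obtain ⟨h1, h2, h3, h4⟩ := ih hk1
      rw [findK, if_pos (by simpa using hm)]
      refine ⟨h1, h2, by push_cast; omega, ?_⟩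
      intro d hd1 hd2 hdm
      rcases lt_or_eq_of_le hd2 with hlt | heq
      · exact h4 d hd1 (by push_cast at hlt ⊢; omega) hdm
      · exact absurd (heq ▸ hdm) (by push_cast; simpa using hm)

-- in a strictly increasing list the maximum is the last element
lemma getLast?_of_max (l : List Int) (hp : l.Pairwise (· < ·)) (x : Int)
    (hx : x ∈ l) (hmax : ∀ y ∈ l, y ≤ x) : l.getLast? = some x := by
  induction l with
  | nil => cases hx
  | cons a t ih =>
    rcases List.pairwise_cons.mp hp with ⟨hat, ht⟩
    cases t with
    | nil => simp at hx ⊢; omega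
    | cons b t' =>
      have hxt : x ∈ b :: t' := by
        rcases List.mem_cons.mp hx with rfl | h
        · exact absurd (hmax b (by simp)) (not_le.mpr (hat b (by simp)))
        · exact h
      rw [List.getLast?_cons_cons]
      exact ih ht hxt (fun y hy => hmax y (List.mem_cons_of_mem a hy))

theorem main_eq (n : Int) (hn : 1 ≤ n) : get_groups n = get_groups_alt n := by
  obtain ⟨hS1, hS2, hS3⟩ := sqrt_facts n hn
  set S := pySqrtInt n with hSdef
  set K := findK n S.toNat with hKdef
  have hScast : ((S.toNat : Nat) : Int) = S := Int.toNat_of_nonneg (by omega)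
  obtain ⟨hKm, hK1, hKle, hKmax⟩ := findK_spec n hn S.toNat (by omega)
  rw [hScast] at hKle hKmax
  have hKF : K ∈ divsF n := (mem_divsF n K).mpr ⟨hK1, hKle, hKm⟩
  have hKlast : (divsF n).getLast? = some K :=
    getLast?_of_max (divsF n) (divsF_pairwise n) K hKF
      (fun y hy => by
        obtain ⟨hy1, hy2, hy3⟩ := (mem_divsF n y).mp hy
        exact hKmax y hy1 hy2 hy3)
  -- notation
  set F := divsF n with hF
  set G := divsG n with hG
  set s := F.length with hs
  have hs1 : 1 ≤ s := List.length_pos_of_mem hKF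
  have hGfilter : G = (F.filter (fun j => decide (j * j ≠ n))).map
      (fun j => PySem.Int.floordiv n j) := by
    rw [hG, hF]
    unfold divsG divsF
    rw [List.filter_filter]
    congr 1
    apply List.filter_congr
    intro j _
    simp [Bool.and_comm]
  have hlenA : ((PySem.List.pyRange 1 (S + 1) 1).flatMap (aChunk n)).length
      = s + G.length := by
    have := (aDivs_perm n hn).length_eq
    simpa using this
  simp only [get_groups, get_groups_alt]
  rw [aDivs_eq n, main_list_eq n hn, hlenA, ← hKdef, ← hF, ← hG]
  by_cases hsq : S * S = n
  · -- perfect square: K = S, median is the last small divisor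
    have hSmem : S ∈ F := (mem_divsF n S).mpr
      ⟨by omega, le_rfl, (PySem.Int.mod_eq_zero_iff_dvd n S).mpr ⟨S, hsq.symm⟩⟩
    have hKS : K = S := le_antisymm hKle (hKmax S (by omega) le_rfl
      ((PySem.Int.mod_eq_zero_iff_dvd n S).mpr ⟨S, hsq.symm⟩))
    -- the cofactor filter drops exactly S
    have hfe : F.filter (fun j => decide (j * j ≠ n)) = F.filter (fun j => decide (j ≠ S)) := by
      apply List.filter_congr
      intro j hj
      obtain ⟨hj1, hj2, _⟩ := (mem_divsF n j).mp hj
      simp only [decide_eq_decide]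
      constructor
      · intro h he; exact h (by rw [he]; exact hsq)
      · intro h he; exact h (by nlinarith)
    have hnodup : F.Nodup := (divsF_pairwise n).imp (fun h => ne_of_lt h)
    have hglen : G.length = s - 1 := by
      rw [hGfilter, List.length_map, hfe]
      have : F.filter (fun j => decide (j ≠ S)) = F.erase S := by
        rw [hnodup.erase_eq_filter]
        apply List.filter_congr
        intro j _
        simp [bne, beq_eq_decide]
      rw [this, List.length_erase_of_mem hSmem]
    rw [hglen]
    have hidx : (s + (s - 1)) / 2 = s - 1 := by omega
    rw [hidx]
    have hget : (F ++ G.reverse)[s-1]? = some K := by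
      rw [List.getElem?_append_left (by omega)]
      rw [← hKlast, List.getLast?_eq_getElem?]
    simp [hget, hKS, hsq]
  · -- not a square: every small divisor has a distinct cofactor; median = n // K
    have hfe : F.filter (fun j => decide (j * j ≠ n)) = F := by
      apply List.filter_eq_self.mpr
      intro j hj
      obtain ⟨hj1, hj2, _⟩ := (mem_divsF n j).mp hj
      simp only [decide_eq_true_eq]
      intro he
      exact hsq (by nlinarith)
    have hGmap : G = F.map (fun j => PySem.Int.floordiv n j) := by rw [hGfilter, hfe]
    have hglen : G.length = s := by rw [hGmap, List.length_map]
    rw [hglen]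
    have hidx : (s + s) / 2 = s := by omega
    rw [hidx]
    have hKsq : K * K ≠ n := by
      intro he
      exact hsq (by nlinarith)
    have hget : (F ++ G.reverse)[s]? = some (PySem.Int.floordiv n K) := by
      rw [List.getElem?_append_right (by omega)]
      have h0 : s - F.length = 0 := by omega
      rw [h0]
      have : G.reverse[0]? = G.reverse.head? := by
        cases hGr : G.reverse <;> simp
      rw [this, List.head?_reverse, hGmap, List.getLast?_map, hKlast]
      rfl
    simp [hget, hKsq]

-- ===== VERDICT (by name: the statement is the Claim_ definition above) =====
theorem get_groups_spec : Claim_equal_get_groups := by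
  intro channels hdom hpre
  unfold Spec_get_groups
  exact (main_eq channels hpre).symm ▸ rfl
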